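-- pv_equiv track=rewrite | github.com/klknet/geeks4geeks | algorithm/misc/largest_subsquare.py | largest_subsquare
-- ===== SOURCE A (Python) =====
-- def largest_subsquare(matrix):
--     n = len(matrix[0])
--     ver = [[0 for col in range(n)] for row in range(n)]
--     hor = [[0 for col in range(n)] for row in range(n)]
--     ver[0][0] = hor[0][0] = int(matrix[0][0] == 'X')
--     # init ver and hor matrix
--     for i in range(n):
--         for j in range(n):
--             if matrix[i][j] == 'O':
--                 ver[i][j] = 0
--                 hor[i][j] = 0
--             else:
--                 hor[i][j] = 1 if j == 0 else hor[i][j - 1] + 1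
--                 ver[i][j] = 1 if i == 0 else ver[i - 1][j] + 1
--     m = 0
--     for i in range(n - 1, -1, -1):
--         for j in range(n - 1, -1, -1):
--             small = min(ver[i][j], hor[i][j])
--             while small > m:
--                 if ver[i][j - small + 1] >= small or hor[i - small + 1][j] >= small:
--                     m = small
--                     break
--                 small -= 1
--     return m
-- ===== SOURCE B (Python) =====
-- def largest_subsquare(matrix):
--     n = len(matrix[0])
--     hor = []
--     ver = []
--     prev = [0] * n
--     for i in range(n):
--         row = matrix[i]
--         h = []
--         v = []
--         run = 0
--         for j in range(n):
--             if row[j] == 'O':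
--                 run = 0
--                 v.append(0)
--             else:
--                 run += 1
--                 v.append(prev[j] + 1)
--             h.append(run)
--         hor.append(h)
--         ver.append(v)
--         prev = v
--     smax = 0
--     for i in range(n):
--         for j in range(n):
--             smax = max(smax, min(ver[i][j], hor[i][j]))
--     for s in range(smax, 0, -1):
--         for i in range(n):
--             for j in range(n):
--                 if min(ver[i][j], hor[i][j]) >= s and (ver[i][j - s + 1] >= s or hor[i - s + 1][j] >= s):
--                     return s
--     return 0
-- ===== Notes on version B (the rewrite author's own statement) =====
-- stated objective: alternative
-- what changed: B builds the run-length tables functionally row-by-row with a running horizontal counter and the previous vertical row (no preallocated 2D arrays, no in-place writes), then replaces A's corner-major reverse scan with a bounded shrinking while-loop by a size-major search: it computes the maximum of min(ver,hor) over all cells and, for each candidate size from that maximum downward, scans all cells for a valid corner, returning the first size that validates.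
import Mathlib
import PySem

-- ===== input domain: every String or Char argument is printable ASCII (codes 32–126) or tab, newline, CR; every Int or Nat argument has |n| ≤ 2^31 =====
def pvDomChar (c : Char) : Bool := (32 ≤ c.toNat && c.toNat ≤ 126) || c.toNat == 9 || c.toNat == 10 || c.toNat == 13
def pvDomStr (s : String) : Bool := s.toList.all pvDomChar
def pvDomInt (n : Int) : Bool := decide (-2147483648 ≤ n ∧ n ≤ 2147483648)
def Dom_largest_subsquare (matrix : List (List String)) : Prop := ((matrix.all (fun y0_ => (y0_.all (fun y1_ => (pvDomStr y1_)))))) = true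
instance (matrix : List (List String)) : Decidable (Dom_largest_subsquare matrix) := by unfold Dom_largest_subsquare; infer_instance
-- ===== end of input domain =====

-- B replaces A's corner-major reverse scan with a bounded while-loop by a size-major search over
-- functionally built run-length tables; the return values are proved equal on Pre_ (where A's Python returns).

-- ===== PORT A =====
-- shared accessors: both Pythons read matrix[i][j] / table[i][j] the same way
def pvCell (matrix : List (List String)) (i j : Int) : String :=
  PySem.List.pyGetD (PySem.List.pyGetD matrix i []) j ""

def pvAt (t : List (List Int)) (i j : Int) : Int :=
  PySem.List.pyGetD (PySem.List.pyGetD t i []) j 0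

-- table[i][j] = x  (in-place assignment)
def pvSet2 (t : List (List Int)) (i j : Int) (x : Int) : List (List Int) :=
  PySem.List.pySetD t i (PySem.List.pySetD (PySem.List.pyGetD t i []) j x)

-- the `while small > m:` loop of A (break on the or-test, else small -= 1)
def pvWhileA (ver hor : List (List Int)) (i j small m : Int) : Int :=
  if h : small > m then
    if pvAt ver i (j - small + 1) ≥ small ∨ pvAt hor (i - small + 1) j ≥ small then small
    else pvWhileA ver hor i j (small - 1) m
  else m
termination_by (small - m).toNat
decreasing_by omega

-- body of the init double loop of A
def pvStepA (matrix : List (List String)) (vh : List (List Int) × List (List Int))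
    (i j : Int) : List (List Int) × List (List Int) :=
  if pvCell matrix i j = "O" then
    (pvSet2 vh.1 i j 0, pvSet2 vh.2 i j 0)
  else
    let h' := pvSet2 vh.2 i j (if j = 0 then 1 else pvAt vh.2 i (j - 1) + 1)
    let v' := pvSet2 vh.1 i j (if i = 0 then 1 else pvAt vh.1 (i - 1) j + 1)
    (v', h')

-- builds ver and hor (the two comprehensions, the chained [0][0] assignment, the init double loop)
def pvInitA (matrix : List (List String)) (n : Int) : List (List Int) × List (List Int) :=
  let ver0 : List (List Int) :=
    (PySem.List.pyRange 0 n 1).map (fun _ => (PySem.List.pyRange 0 n 1).map (fun _ => (0 : Int)))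
  let hor0 : List (List Int) :=
    (PySem.List.pyRange 0 n 1).map (fun _ => (PySem.List.pyRange 0 n 1).map (fun _ => (0 : Int)))
  let c00 : Int := if pvCell matrix 0 0 = "X" then 1 else 0
  (PySem.List.pyRange 0 n 1).foldl (fun vh i =>
    (PySem.List.pyRange 0 n 1).foldl (fun vh j => pvStepA matrix vh i j) vh)
    (pvSet2 ver0 0 0 c00, pvSet2 hor0 0 0 c00)

-- one cell of the m-loop: min of the two runs, then the while
def pvCellStepA (ver hor : List (List Int)) (m i j : Int) : Int :=
  pvWhileA ver hor i j (min (pvAt ver i j) (pvAt hor i j)) m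

-- the m-loop: reverse corner-major double loop
def pvScanA (ver hor : List (List Int)) (n : Int) : Int :=
  (PySem.List.pyRange (n - 1) (-1) (-1)).foldl (fun m i =>
    (PySem.List.pyRange (n - 1) (-1) (-1)).foldl (fun m j => pvCellStepA ver hor m i j) m) 0

def largest_subsquare (matrix : List (List String)) : Int :=
  let n : Int := PySem.List.len (PySem.List.pyGetD matrix 0 ([] : List String))
  match pvInitA matrix n with
  | (ver, hor) => pvScanA ver hor n

-- ===== PORT B =====
-- one cell of B's row builder: running horizontal counter, previous vertical row
def pvStepB (row : List String) (prev : List Int)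
    (hv : List Int × List Int × Int) (j : Int) : List Int × List Int × Int :=
  if PySem.List.pyGetD row j "" = "O" then
    (hv.1 ++ [(0 : Int)], hv.2.1 ++ [(0 : Int)], (0 : Int))
  else
    let run := hv.2.2 + 1
    (hv.1 ++ [run], hv.2.1 ++ [PySem.List.pyGetD prev j 0 + 1], run)

-- row-by-row functional build of hor and ver
def pvBuildB (matrix : List (List String)) (n : Int) :
    List (List Int) × List (List Int) × List Int :=
  (PySem.List.pyRange 0 n 1).foldl (fun (st : List (List Int) × List (List Int) × List Int) i =>
    let row := PySem.List.pyGetD matrix i ([] : List String)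
    let inner := (PySem.List.pyRange 0 n 1).foldl (pvStepB row st.2.2) ([], [], (0 : Int))
    (st.1 ++ [inner.1], st.2.1 ++ [inner.2.1], inner.2.1))
    ([], [], PySem.List.pyRepeat [(0 : Int)] n)

-- smax = max over all cells of min(ver[i][j], hor[i][j])
def pvSmaxB (ver hor : List (List Int)) (n : Int) : Int :=
  (PySem.List.pyRange 0 n 1).foldl (fun sm i =>
    (PySem.List.pyRange 0 n 1).foldl (fun sm j =>
      max sm (min (pvAt ver i j) (pvAt hor i j))) sm) 0

-- does any cell validate size s?
def pvAnyCell (ver hor : List (List Int)) (n s : Int) : Bool :=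
  (PySem.List.pyRange 0 n 1).any (fun i => (PySem.List.pyRange 0 n 1).any (fun j =>
    decide (min (pvAt ver i j) (pvAt hor i j) ≥ s ∧
      (pvAt ver i (j - s + 1) ≥ s ∨ pvAt hor (i - s + 1) j ≥ s))))

-- for s in range(smax, 0, -1): if any cell validates, return s; else return 0
def pvSearchB (ver hor : List (List Int)) (n s : Int) : Int :=
  if h : s > 0 then
    if pvAnyCell ver hor n s then s else pvSearchB ver hor n (s - 1)
  else 0
termination_by s.toNat
decreasing_by omega

def largest_subsquare_alt (matrix : List (List String)) : Int :=
  let n : Int := PySem.List.len (PySem.List.pyGetD matrix 0 ([] : List String))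
  match pvBuildB matrix n with
  | (hor, ver, _) => pvSearchB ver hor n (pvSmaxB ver hor n)

-- ===== PRECONDITION & SPEC =====
-- Pre_ excludes exactly the inputs where A's Python raises IndexError: empty matrix or empty first
-- row (n = 0), fewer than n rows, or one of the first n rows shorter than n (n = len(matrix[0])).
def Pre_largest_subsquare (matrix : List (List String)) : Prop :=
  1 ≤ (matrix.headD []).length ∧ (matrix.headD []).length ≤ matrix.length ∧
    ∀ row ∈ matrix.take (matrix.headD []).length, (matrix.headD []).length ≤ row.length
instance (matrix : List (List String)) : Decidable (Pre_largest_subsquare matrix) := by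
  unfold Pre_largest_subsquare; infer_instance

def pvWitness_largest_subsquare : List (List String) := [["X", "X"], ["X", "O"]]

def Spec_largest_subsquare (matrix : List (List String)) (out : Int) : Prop := out = largest_subsquare_alt matrix
instance (matrix : List (List String)) (out : Int) : Decidable (Spec_largest_subsquare matrix out) := by unfold Spec_largest_subsquare; infer_instance

-- ===== CLAIM (what is proved, stated in full; the proofs are below) =====
def Claim_equal_largest_subsquare : Prop := ∀ (matrix : List (List String)), Dom_largest_subsquare matrix → Pre_largest_subsquare matrix → Spec_largest_subsquare matrix (largest_subsquare matrix)

-- ===== LEMMAS AND PROOFS =====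

-- total cell reading with Nat indices (defaults agree with pvCell)
def cellN (matrix : List (List String)) (i j : Nat) : String := (matrix.getD i []).getD j ""

-- the run-length specs
def Hspec (matrix : List (List String)) (i : Nat) : Nat → Int
  | 0 => if cellN matrix i 0 = "O" then 0 else 1
  | j + 1 => if cellN matrix i (j + 1) = "O" then 0 else Hspec matrix i j + 1

def Vspec (matrix : List (List String)) : Nat → Nat → Int
  | 0, j => if cellN matrix 0 j = "O" then 0 else 1
  | i + 1, j => if cellN matrix (i + 1) j = "O" then 0 else Vspec matrix i j + 1

lemma Hspec_eq (matrix : List (List String)) (i j : Nat) :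
    Hspec matrix i j = if cellN matrix i j = "O" then 0 else if j = 0 then 1 else Hspec matrix i (j - 1) + 1 := by
  cases j <;> simp [Hspec]

lemma Vspec_eq (matrix : List (List String)) (i j : Nat) :
    Vspec matrix i j = if cellN matrix i j = "O" then 0 else if i = 0 then 1 else Vspec matrix (i - 1) j + 1 := by
  cases i <;> simp [Vspec]

def tbl (n : Nat) (g : Nat → Nat → Int) : List (List Int) :=
  (List.range n).map (fun r => (List.range n).map (g r))

lemma pvCell_natCast (matrix : List (List String)) (i j : Nat) :
    pvCell matrix (i : Int) (j : Int) = cellN matrix i j := by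
  simp [pvCell, cellN]

lemma tbl_congr {n : Nat} {g g' : Nat → Nat → Int}
    (h : ∀ r c, r < n → c < n → g r c = g' r c) : tbl n g = tbl n g' := by
  unfold tbl
  apply List.map_congr_left
  intro r hr
  exact List.map_congr_left fun c hc => h r c (List.mem_range.mp hr) (List.mem_range.mp hc)

lemma pvAt_tbl {n : Nat} (g : Nat → Nat → Int) {i j : Nat} (hi : i < n) (hj : j < n) :
    pvAt (tbl n g) (i : Int) (j : Int) = g i j := by
  simp [pvAt, tbl, List.getD_eq_getElem?_getD, hi, hj]

lemma pvSet2_tbl {n : Nat} (g : Nat → Nat → Int) {i j : Nat} (hi : i < n) (hj : j < n) (x : Int) :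
    pvSet2 (tbl n g) (i : Int) (j : Int) x
      = tbl n (fun r c => if r = i ∧ c = j then x else g r c) := by
  simp only [pvSet2, PySem.List.pySetD_natCast, PySem.List.pyGetD_natCast]
  apply List.ext_getElem
  · simp [tbl]
  intro r h1 h2
  simp only [tbl, List.getD_eq_getElem?_getD, List.getElem?_map, List.getElem?_range, hi] at *
  simp only [List.length_set] at h1
  rw [List.getElem_set]
  by_cases hri : r = i
  · subst hri
    simp [hi]
    apply List.ext_getElem
    · simp
    intro c hc1 hc2
    simp only [List.length_map, List.length_range] at hc1
    rw [List.getElem_set]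
    by_cases hcj : c = j <;> simp [hcj]
    intro h; exact absurd h.symm hcj
  · simp [hri, List.getElem_map, List.getElem_range]
    intro h; exact absurd h.symm hri

-- ---- A's table build ----

-- partially initialised tables of A: rows < i done, row i done up to column j
def gVA (matrix : List (List String)) (i j : Nat) : Nat → Nat → Int := fun r c =>
  if r < i ∨ (r = i ∧ c < j) then Vspec matrix r c
  else if r = 0 ∧ c = 0 then (if cellN matrix 0 0 = "X" then 1 else 0) else 0

def gHA (matrix : List (List String)) (i j : Nat) : Nat → Nat → Int := fun r c =>
  if r < i ∨ (r = i ∧ c < j) then Hspec matrix r c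
  else if r = 0 ∧ c = 0 then (if cellN matrix 0 0 = "X" then 1 else 0) else 0

lemma gVA_step (matrix : List (List String)) (i j : Nat) :
    (fun r c => if r = i ∧ c = j then Vspec matrix i j else gVA matrix i j r c)
      = gVA matrix i (j + 1) := by
  funext r c
  by_cases h1 : r = i ∧ c = j
  · obtain ⟨rfl, rfl⟩ := h1
    simp [gVA, Nat.lt_succ_self]
  · by_cases h2 : r < i ∨ (r = i ∧ c < j)
    · have h3 : r < i ∨ (r = i ∧ c < j + 1) := by omega
      simp only [gVA, h1, if_false, if_pos h2, if_pos h3]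
    · have h3 : ¬(r < i ∨ (r = i ∧ c < j + 1)) := by omega
      simp only [gVA, h1, if_false, if_neg h2, if_neg h3]

lemma gHA_step (matrix : List (List String)) (i j : Nat) :
    (fun r c => if r = i ∧ c = j then Hspec matrix i j else gHA matrix i j r c)
      = gHA matrix i (j + 1) := by
  funext r c
  by_cases h1 : r = i ∧ c = j
  · obtain ⟨rfl, rfl⟩ := h1
    simp [gHA, Nat.lt_succ_self]
  · by_cases h2 : r < i ∨ (r = i ∧ c < j)
    · have h3 : r < i ∨ (r = i ∧ c < j + 1) := by omega
      simp only [gHA, h1, if_false, if_pos h2, if_pos h3]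
    · have h3 : ¬(r < i ∨ (r = i ∧ c < j + 1)) := by omega
      simp only [gHA, h1, if_false, if_neg h2, if_neg h3]

lemma stepA_tbl (matrix : List (List String)) {n i j : Nat} (hi : i < n) (hj : j < n) :
    pvStepA matrix (tbl n (gVA matrix i j), tbl n (gHA matrix i j)) (i : Int) (j : Int)
      = (tbl n (gVA matrix i (j + 1)), tbl n (gHA matrix i (j + 1))) := by
  unfold pvStepA
  rw [pvCell_natCast]
  by_cases hO : cellN matrix i j = "O"
  · rw [if_pos hO]
    have hv0 : (0 : Int) = Vspec matrix i j := by rw [Vspec_eq, if_pos hO]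
    have hh0 : (0 : Int) = Hspec matrix i j := by rw [Hspec_eq, if_pos hO]
    rw [Prod.mk.injEq]
    constructor
    · rw [hv0, pvSet2_tbl _ hi hj, gVA_step]
    · rw [hh0, pvSet2_tbl _ hi hj, gHA_step]
  · rw [if_neg hO]
    have hxH : (if (j : Int) = 0 then 1 else pvAt (tbl n (gHA matrix i j)) (i : Int) ((j : Int) - 1) + 1)
        = Hspec matrix i j := by
      by_cases hj0 : j = 0
      · subst hj0
        rw [if_pos (by simp)]
        rw [Hspec_eq, if_neg hO, if_pos rfl]
      · rw [if_neg (by exact_mod_cast hj0)]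
        have hc : ((j : Int) - 1) = ((j - 1 : Nat) : Int) := by omega
        rw [hc, pvAt_tbl _ hi (by omega)]
        have : gHA matrix i j i (j - 1) = Hspec matrix i (j - 1) := by
          unfold gHA
          rw [if_pos (show i < i ∨ (i = i ∧ j - 1 < j) by omega)]
        rw [this, Hspec_eq matrix i j, if_neg hO, if_neg hj0]
    have hxV : (if (i : Int) = 0 then 1 else pvAt (tbl n (gVA matrix i j)) ((i : Int) - 1) (j : Int) + 1)
        = Vspec matrix i j := by
      by_cases hi0 : i = 0
      · subst hi0
        rw [if_pos (by simp)]
        rw [Vspec_eq, if_neg hO, if_pos rfl]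
      · rw [if_neg (by exact_mod_cast hi0)]
        have hc : ((i : Int) - 1) = ((i - 1 : Nat) : Int) := by omega
        rw [hc, pvAt_tbl _ (by omega) hj]
        have : gVA matrix i j (i - 1) j = Vspec matrix (i - 1) j := by
          unfold gVA
          rw [if_pos (show i - 1 < i ∨ (i - 1 = i ∧ j < j) by omega)]
        rw [this, Vspec_eq matrix i j, if_neg hO, if_neg hi0]
    simp only []
    rw [Prod.mk.injEq]
    constructor
    · rw [hxV, pvSet2_tbl _ hi hj, gVA_step]
    · rw [hxH, pvSet2_tbl _ hi hj, gHA_step]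

lemma rowA_tbl (matrix : List (List String)) {n i : Nat} (hi : i < n) :
    ∀ j, j ≤ n →
      ((List.range j).map (fun k => (Nat.cast k : Int))).foldl (fun vh jj => pvStepA matrix vh (i : Int) jj)
        (tbl n (gVA matrix i 0), tbl n (gHA matrix i 0))
      = (tbl n (gVA matrix i j), tbl n (gHA matrix i j)) := by
  intro j
  induction j with
  | zero => intro _; simp
  | succ j ih =>
    intro hj
    rw [List.range_succ, List.map_append, List.foldl_append, ih (by omega)]
    simp only [List.map_cons, List.map_nil, List.foldl_cons, List.foldl_nil]
    exact stepA_tbl matrix hi (by omega)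

lemma outerA_tbl (matrix : List (List String)) {n : Nat} :
    ∀ i, i ≤ n →
      ((List.range i).map (fun k => (Nat.cast k : Int))).foldl (fun vh ii =>
          ((List.range n).map (fun k => (Nat.cast k : Int))).foldl (fun vh j => pvStepA matrix vh ii j) vh)
        (tbl n (gVA matrix 0 0), tbl n (gHA matrix 0 0))
      = (tbl n (gVA matrix i 0), tbl n (gHA matrix i 0)) := by
  intro i
  induction i with
  | zero => intro _; simp
  | succ i ih =>
    intro hi
    rw [List.range_succ, List.map_append, List.foldl_append, ih (by omega)]
    simp only [List.map_cons, List.map_nil, List.foldl_cons, List.foldl_nil]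
    rw [rowA_tbl matrix (by omega : i < n) n le_rfl]
    rw [Prod.mk.injEq]
    constructor
    · exact tbl_congr (fun r c hr hc => by
        simp only [gVA]
        have : (r < i ∨ (r = i ∧ c < n)) ↔ (r < i + 1 ∨ (r = i + 1 ∧ c < 0)) := by omega
        by_cases h : r < i ∨ (r = i ∧ c < n)
        · rw [if_pos h, if_pos (this.mp h)]
        · rw [if_neg h, if_neg (fun hh => h (this.mpr hh))])
    · exact tbl_congr (fun r c hr hc => by
        simp only [gHA]
        have : (r < i ∨ (r = i ∧ c < n)) ↔ (r < i + 1 ∨ (r = i + 1 ∧ c < 0)) := by omega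
        by_cases h : r < i ∨ (r = i ∧ c < n)
        · rw [if_pos h, if_pos (this.mp h)]
        · rw [if_neg h, if_neg (fun hh => h (this.mpr hh))])

lemma initA_eq (matrix : List (List String)) {n : Nat} (hn : 0 < n) :
    pvInitA matrix (n : Int) = (tbl n (Vspec matrix), tbl n (Hspec matrix)) := by
  unfold pvInitA
  simp only [PySem.List.pyRange_zero_natCast]
  have hzero : (List.map (fun k => (Nat.cast k : Int)) (List.range n)).map
      (fun _ => (List.map (fun k => (Nat.cast k : Int)) (List.range n)).map (fun _ => (0 : Int)))
      = tbl n (fun _ _ => (0 : Int)) := by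
    simp [tbl, List.map_map, Function.comp_def, List.map_const']
  rw [hzero]
  have hV : pvSet2 (tbl n (fun _ _ => (0 : Int))) 0 0 (if pvCell matrix 0 0 = "X" then 1 else 0)
      = tbl n (gVA matrix 0 0) := by
    have h := pvSet2_tbl (n := n) (fun _ _ => (0 : Int)) (i := 0) (j := 0) hn hn
      (if pvCell matrix 0 0 = "X" then 1 else 0)
    simp only [Nat.cast_zero] at h
    rw [h]
    apply tbl_congr
    intro r c hr hc
    have hc00 : pvCell matrix 0 0 = cellN matrix 0 0 := by simpa using pvCell_natCast matrix 0 0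
    unfold gVA
    rw [if_neg (show ¬(r < 0 ∨ (r = 0 ∧ c < 0)) by omega), hc00]
  have hVH : gVA matrix 0 0 = gHA matrix 0 0 := by
    funext r c
    unfold gVA gHA
    rw [if_neg (show ¬(r < 0 ∨ (r = 0 ∧ c < 0)) by omega),
      if_neg (show ¬(r < 0 ∨ (r = 0 ∧ c < 0)) by omega)]
  have hH : pvSet2 (tbl n (fun _ _ => (0 : Int))) 0 0 (if pvCell matrix 0 0 = "X" then 1 else 0)
      = tbl n (gHA matrix 0 0) := by
    rw [hV, hVH]
  have hpair : (pvSet2 (tbl n (fun _ _ => (0 : Int))) 0 0 (if pvCell matrix 0 0 = "X" then 1 else 0),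
      pvSet2 (tbl n (fun _ _ => (0 : Int))) 0 0 (if pvCell matrix 0 0 = "X" then 1 else 0))
      = (tbl n (gVA matrix 0 0), tbl n (gHA matrix 0 0)) := by
    rw [Prod.mk.injEq]
    exact ⟨hV, hH⟩
  rw [hpair, outerA_tbl matrix n le_rfl, Prod.mk.injEq]
  constructor
  · exact tbl_congr (fun r c hr hc => by unfold gVA; rw [if_pos (Or.inl hr)])
  · exact tbl_congr (fun r c hr hc => by unfold gHA; rw [if_pos (Or.inl hr)])

-- ---- B's table build ----

def pvPrev (matrix : List (List String)) (i c : Nat) : Int :=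
  if i = 0 then 0 else Vspec matrix (i - 1) c

lemma rowB_tbl (matrix : List (List String)) {n i : Nat} (prev : List Int)
    (hq : ∀ c : Nat, c < n → PySem.List.pyGetD prev (c : Int) 0 = pvPrev matrix i c) :
    ∀ j, j ≤ n →
      ((List.range j).map (fun k => (Nat.cast k : Int))).foldl
        (pvStepB (PySem.List.pyGetD matrix (i : Int) []) prev) ([], [], (0 : Int))
      = ((List.range j).map (fun c => Hspec matrix i c),
         (List.range j).map (fun c => Vspec matrix i c),
         if j = 0 then 0 else Hspec matrix i (j - 1)) := by
  intro j
  induction j with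
  | zero => intro _; simp
  | succ j ih =>
    intro hj
    rw [List.range_succ, List.map_append, List.foldl_append, ih (by omega)]
    simp only [List.map_cons, List.map_nil, List.foldl_cons, List.foldl_nil]
    unfold pvStepB
    have hcell := pvCell_natCast matrix i j
    unfold pvCell at hcell
    rw [hcell]
    by_cases hO : cellN matrix i j = "O"
    · rw [if_pos hO]
      have hh : Hspec matrix i j = 0 := by rw [Hspec_eq, if_pos hO]
      have hv : Vspec matrix i j = 0 := by rw [Vspec_eq, if_pos hO]
      simp [List.range_succ, hh, hv]
    · rw [if_neg hO]
      have hrun : (if j = 0 then (0 : Int) else Hspec matrix i (j - 1)) + 1 = Hspec matrix i j := by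
        rw [Hspec_eq matrix i j, if_neg hO]
        by_cases hj0 : j = 0 <;> simp [hj0]
      have hvv : PySem.List.pyGetD prev (j : Int) 0 + 1 = Vspec matrix i j := by
        rw [hq j (by omega)]
        unfold pvPrev
        rw [Vspec_eq matrix i j, if_neg hO]
        by_cases hi0 : i = 0 <;> simp [hi0]
      simp [List.range_succ, hrun]
      simpa [List.getD_eq_getElem?_getD] using hvv

lemma outerB_tbl (matrix : List (List String)) (n : Nat) :
    ∀ i, i ≤ n →
      ((List.range i).map (fun k => (Nat.cast k : Int))).foldl
        (fun (st : List (List Int) × List (List Int) × List Int) ii =>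
          let row := PySem.List.pyGetD matrix ii []
          let inner := ((List.range n).map (fun k => (Nat.cast k : Int))).foldl
            (pvStepB row st.2.2) ([], [], (0 : Int))
          (st.1 ++ [inner.1], st.2.1 ++ [inner.2.1], inner.2.1))
        ([], [], PySem.List.pyRepeat [(0 : Int)] (n : Int))
      = ((List.range i).map (fun r => (List.range n).map (fun c => Hspec matrix r c)),
         (List.range i).map (fun r => (List.range n).map (fun c => Vspec matrix r c)),
         if i = 0 then PySem.List.pyRepeat [(0 : Int)] (n : Int)
         else (List.range n).map (fun c => Vspec matrix (i - 1) c)) := by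
  intro i
  induction i with
  | zero => intro _; simp
  | succ i ih =>
    intro hi
    rw [List.range_succ, List.map_append, List.foldl_append, ih (by omega)]
    simp only [List.map_cons, List.map_nil, List.foldl_cons, List.foldl_nil]
    have hq : ∀ c : Nat, c < n →
        PySem.List.pyGetD (if i = 0 then PySem.List.pyRepeat [(0 : Int)] (n : Int)
          else (List.range n).map (fun c => Vspec matrix (i - 1) c)) (c : Int) 0
          = pvPrev matrix i c := by
      intro c hc
      by_cases hi0 : i = 0
      · simp only [hi0, if_pos rfl]
        rw [PySem.List.pyRepeat_singleton]
        simp [pvPrev, List.getD_eq_getElem?_getD, List.getElem?_replicate, hc]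
      · simp only [hi0, if_neg hi0]
        simp [pvPrev, hi0, List.getD_eq_getElem?_getD, hc]
    rw [rowB_tbl matrix _ hq n le_rfl]
    simp [List.range_succ]

lemma buildB_eq (matrix : List (List String)) (n : Nat) :
    (pvBuildB matrix (n : Int)).1 = tbl n (Hspec matrix) ∧
    (pvBuildB matrix (n : Int)).2.1 = tbl n (Vspec matrix) := by
  unfold pvBuildB
  simp only [PySem.List.pyRange_zero_natCast]
  rw [outerB_tbl matrix n n le_rfl]
  exact ⟨rfl, rfl⟩

-- ---- the common maximisation predicate ----

def okP (ver hor : List (List Int)) (i j s : Int) : Prop :=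
  pvAt ver i (j - s + 1) ≥ s ∨ pvAt hor (i - s + 1) j ≥ s

def GoodP (ver hor : List (List Int)) (n s : Int) : Prop :=
  1 ≤ s ∧ ∃ i j : Int, 0 ≤ i ∧ i < n ∧ 0 ≤ j ∧ j < n ∧
    s ≤ pvAt ver i j ∧ s ≤ pvAt hor i j ∧ okP ver hor i j s

def IsMaxGood (ver hor : List (List Int)) (n M : Int) : Prop :=
  0 ≤ M ∧ (M = 0 ∨ GoodP ver hor n M) ∧ ∀ s, GoodP ver hor n s → s ≤ M

lemma IsMaxGood_unique {ver hor : List (List Int)} {n M1 M2 : Int}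
    (h1 : IsMaxGood ver hor n M1) (h2 : IsMaxGood ver hor n M2) : M1 = M2 := by
  obtain ⟨a1, b1, c1⟩ := h1; obtain ⟨a2, b2, c2⟩ := h2
  rcases b1 with rfl | g1 <;> rcases b2 with rfl | g2
  · rfl
  · have := c1 _ g2; have := g2.1; omega
  · have := c2 _ g1; have := g1.1; omega
  · exact le_antisymm (c2 _ g1) (c1 _ g2)

-- ---- A's scan satisfies IsMaxGood ----

lemma whileA_spec (ver hor : List (List Int)) (i j : Int) :
    ∀ small m : Int, 0 ≤ m →
      m ≤ pvWhileA ver hor i j small m ∧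
      (pvWhileA ver hor i j small m = m ∨
        (m < pvWhileA ver hor i j small m ∧ pvWhileA ver hor i j small m ≤ small ∧
          okP ver hor i j (pvWhileA ver hor i j small m))) ∧
      (∀ s, m < s → s ≤ small → okP ver hor i j s → s ≤ pvWhileA ver hor i j small m) := by
  intro small m hm
  fun_induction pvWhileA ver hor i j small m with
  | case1 a b c =>
    exact ⟨le_of_lt b, Or.inr ⟨b, le_refl a, c⟩, fun s _ hs _ => hs⟩
  | case2 a b c d =>
    obtain ⟨d1, d2, d3⟩ := d
    refine ⟨d1, d2.imp id (fun ⟨x, y, z⟩ => ⟨x, by omega, z⟩), ?_⟩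
    intro s h1 h2 h3
    rcases eq_or_lt_of_le h2 with rfl | hlt
    · exact absurd h3 c
    · exact d3 s h1 (by omega) h3
  | case3 a b =>
    exact ⟨le_refl m, Or.inl rfl, fun s h1 h2 _ => by omega⟩

lemma cellStepA_spec {ver hor : List (List Int)} {n m i j : Int}
    (hm : 0 ≤ m) (hg : m = 0 ∨ GoodP ver hor n m)
    (hi : 0 ≤ i) (hi' : i < n) (hj : 0 ≤ j) (hj' : j < n) :
    0 ≤ pvCellStepA ver hor m i j ∧
    (pvCellStepA ver hor m i j = 0 ∨ GoodP ver hor n (pvCellStepA ver hor m i j)) ∧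
    m ≤ pvCellStepA ver hor m i j ∧
    ∀ s, 1 ≤ s → s ≤ pvAt ver i j → s ≤ pvAt hor i j → okP ver hor i j s →
      s ≤ pvCellStepA ver hor m i j := by
  obtain ⟨w1, w2, w3⟩ := whileA_spec ver hor i j (min (pvAt ver i j) (pvAt hor i j)) m hm
  unfold pvCellStepA
  refine ⟨by omega, ?_, w1, ?_⟩
  · rcases w2 with he | ⟨ha, hb, hc⟩
    · rw [he]; exact hg
    · right
      exact ⟨by omega, i, j, hi, hi', hj, hj',
        (le_min_iff.mp hb).1, (le_min_iff.mp hb).2, hc⟩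
  · intro s h1 h2 h3 h4
    by_cases hsm : s ≤ m
    · omega
    · exact w3 s (by omega) (le_min h2 h3) h4

lemma foldInnerA {ver hor : List (List Int)} {n i : Int} (hi : 0 ≤ i) (hi' : i < n) :
    ∀ (L : List Int) (m : Int), (∀ x ∈ L, 0 ≤ x ∧ x < n) → 0 ≤ m → (m = 0 ∨ GoodP ver hor n m) →
      0 ≤ L.foldl (fun m j => pvCellStepA ver hor m i j) m ∧
      (L.foldl (fun m j => pvCellStepA ver hor m i j) m = 0 ∨
        GoodP ver hor n (L.foldl (fun m j => pvCellStepA ver hor m i j) m)) ∧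
      m ≤ L.foldl (fun m j => pvCellStepA ver hor m i j) m ∧
      ∀ j ∈ L, ∀ s, 1 ≤ s → s ≤ pvAt ver i j → s ≤ pvAt hor i j → okP ver hor i j s →
        s ≤ L.foldl (fun m j => pvCellStepA ver hor m i j) m := by
  intro L
  induction L with
  | nil => intro m _ hm hg; exact ⟨hm, hg, le_refl m, by simp⟩
  | cons j L ih =>
    intro m hL hm hg
    obtain ⟨c1, c2, c3, c4⟩ :=
      cellStepA_spec hm hg hi hi' (hL j (List.mem_cons_self)).1 (hL j (List.mem_cons_self)).2
    obtain ⟨i1, i2, i3, i4⟩ :=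
      ih (pvCellStepA ver hor m i j) (fun x hx => hL x (List.mem_cons_of_mem _ hx)) c1 c2
    simp only [List.foldl_cons]
    refine ⟨i1, i2, le_trans c3 i3, ?_⟩
    intro j' hj' s h1 h2 h3 h4
    rcases List.mem_cons.mp hj' with rfl | hmem
    · exact le_trans (c4 s h1 h2 h3 h4) i3
    · exact i4 j' hmem s h1 h2 h3 h4

lemma foldOuterA {ver hor : List (List Int)} {n : Int} :
    ∀ (L : List Int) (m : Int), (∀ x ∈ L, 0 ≤ x ∧ x < n) → 0 ≤ m → (m = 0 ∨ GoodP ver hor n m) →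
      0 ≤ L.foldl (fun m i => (PySem.List.pyRange (n - 1) (-1) (-1)).foldl
          (fun m j => pvCellStepA ver hor m i j) m) m ∧
      (L.foldl (fun m i => (PySem.List.pyRange (n - 1) (-1) (-1)).foldl
          (fun m j => pvCellStepA ver hor m i j) m) m = 0 ∨
        GoodP ver hor n (L.foldl (fun m i => (PySem.List.pyRange (n - 1) (-1) (-1)).foldl
          (fun m j => pvCellStepA ver hor m i j) m) m)) ∧
      m ≤ L.foldl (fun m i => (PySem.List.pyRange (n - 1) (-1) (-1)).foldl
          (fun m j => pvCellStepA ver hor m i j) m) m ∧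
      ∀ i ∈ L, ∀ j : Int, 0 ≤ j → j < n →
        ∀ s, 1 ≤ s → s ≤ pvAt ver i j → s ≤ pvAt hor i j → okP ver hor i j s →
          s ≤ L.foldl (fun m i => (PySem.List.pyRange (n - 1) (-1) (-1)).foldl
            (fun m j => pvCellStepA ver hor m i j) m) m := by
  intro L
  induction L with
  | nil => intro m _ hm hg; exact ⟨hm, hg, le_refl m, by simp⟩
  | cons i L ih =>
    intro m hL hm hg
    have hib := hL i List.mem_cons_self
    have hLb : ∀ x ∈ PySem.List.pyRange (n - 1) (-1) (-1), 0 ≤ x ∧ x < n := by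
      intro x hx
      have := PySem.List.mem_pyRange_neg_one.mp hx
      omega
    obtain ⟨c1, c2, c3, c4⟩ :=
      foldInnerA hib.1 hib.2 (PySem.List.pyRange (n - 1) (-1) (-1)) m hLb hm hg
    obtain ⟨i1, i2, i3, i4⟩ := ih _ (fun x hx => hL x (List.mem_cons_of_mem _ hx)) c1 c2
    simp only [List.foldl_cons]
    refine ⟨i1, i2, le_trans c3 i3, ?_⟩
    intro i' hi' j hj0 hjn s h1 h2 h3 h4
    rcases List.mem_cons.mp hi' with rfl | hmem
    · have hjm : j ∈ PySem.List.pyRange (n - 1) (-1) (-1) :=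
        PySem.List.mem_pyRange_neg_one.mpr (by omega)
      exact le_trans (c4 j hjm s h1 h2 h3 h4) i3
    · exact i4 i' hmem j hj0 hjn s h1 h2 h3 h4

lemma scanA_isMax (ver hor : List (List Int)) (n : Int) :
    IsMaxGood ver hor n (pvScanA ver hor n) := by
  have hLb : ∀ x ∈ PySem.List.pyRange (n - 1) (-1) (-1), 0 ≤ x ∧ x < n := by
    intro x hx
    have := PySem.List.mem_pyRange_neg_one.mp hx
    omega
  obtain ⟨o1, o2, _, o4⟩ :=
    foldOuterA (ver := ver) (hor := hor) (n := n)
      (PySem.List.pyRange (n - 1) (-1) (-1)) 0 hLb (le_refl 0) (Or.inl rfl)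
  refine ⟨o1, o2, ?_⟩
  intro s hg
  obtain ⟨hs1, i, j, hi0, hin, hj0, hjn, hv, hh, hok⟩ := hg
  have him : i ∈ PySem.List.pyRange (n - 1) (-1) (-1) :=
    PySem.List.mem_pyRange_neg_one.mpr (by omega)
  exact o4 i him j hj0 hjn s hs1 hv hh hok

-- ---- B's scan satisfies IsMaxGood ----

lemma smaxB_spec (ver hor : List (List Int)) (n : Int) :
    0 ≤ pvSmaxB ver hor n ∧
    ∀ i j : Int, 0 ≤ i → i < n → 0 ≤ j → j < n →
      min (pvAt ver i j) (pvAt hor i j) ≤ pvSmaxB ver hor n := by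
  have key : ∀ (L : List Int) (sm : Int),
      sm ≤ L.foldl (fun sm i => (PySem.List.pyRange 0 n 1).foldl
        (fun sm j => max sm (min (pvAt ver i j) (pvAt hor i j))) sm) sm ∧
      ∀ i ∈ L, ∀ j : Int, 0 ≤ j → j < n →
        min (pvAt ver i j) (pvAt hor i j) ≤ L.foldl (fun sm i => (PySem.List.pyRange 0 n 1).foldl
          (fun sm j => max sm (min (pvAt ver i j) (pvAt hor i j))) sm) sm := by
    intro L
    induction L with
    | nil => intro sm; exact ⟨le_refl sm, by simp⟩
    | cons i L ih =>
      intro sm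
      obtain ⟨h1, h2⟩ := PySem.List.le_foldl_max_int (PySem.List.pyRange 0 n 1)
        (fun j => min (pvAt ver i j) (pvAt hor i j)) sm
      obtain ⟨i1, i2⟩ := ih ((PySem.List.pyRange 0 n 1).foldl
        (fun sm j => max sm (min (pvAt ver i j) (pvAt hor i j))) sm)
      simp only [List.foldl_cons]
      refine ⟨le_trans h1 i1, ?_⟩
      intro i' hi' j hj0 hjn
      rcases List.mem_cons.mp hi' with rfl | hmem
      · exact le_trans (h2 j (PySem.List.mem_pyRange_one.mpr ⟨hj0, hjn⟩)) i1
      · exact i2 i' hmem j hj0 hjn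
  obtain ⟨k1, k2⟩ := key (PySem.List.pyRange 0 n 1) 0
  refine ⟨k1, ?_⟩
  intro i j hi0 hin hj0 hjn
  exact k2 i (PySem.List.mem_pyRange_one.mpr ⟨hi0, hin⟩) j hj0 hjn

lemma anyCell_iff (ver hor : List (List Int)) (n s : Int) :
    pvAnyCell ver hor n s = true ↔
      ∃ i j : Int, 0 ≤ i ∧ i < n ∧ 0 ≤ j ∧ j < n ∧
        s ≤ pvAt ver i j ∧ s ≤ pvAt hor i j ∧ okP ver hor i j s := by
  unfold pvAnyCell okP
  simp only [List.any_eq_true, decide_eq_true_eq, PySem.List.mem_pyRange_one, ge_iff_le,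
    le_min_iff]
  constructor
  · rintro ⟨i, ⟨hi0, hin⟩, j, ⟨hj0, hjn⟩, ⟨h1, h2⟩, h3⟩
    exact ⟨i, j, hi0, hin, hj0, hjn, h1, h2, h3⟩
  · rintro ⟨i, j, hi0, hin, hj0, hjn, h1, h2, h3⟩
    exact ⟨i, ⟨hi0, hin⟩, j, ⟨hj0, hjn⟩, ⟨h1, h2⟩, h3⟩

lemma searchB_spec (ver hor : List (List Int)) (n : Int) :
    ∀ s : Int,
      0 ≤ pvSearchB ver hor n s ∧
      (pvSearchB ver hor n s = 0 ∨
        (0 < pvSearchB ver hor n s ∧ pvAnyCell ver hor n (pvSearchB ver hor n s) = true)) ∧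
      ∀ t, 0 < t → t ≤ s → pvAnyCell ver hor n t = true → t ≤ pvSearchB ver hor n s := by
  intro s
  fun_induction pvSearchB ver hor n s with
  | case1 s hpos hany =>
    exact ⟨by omega, Or.inr ⟨hpos, hany⟩, fun t _ ht _ => ht⟩
  | case2 s hpos hany ih =>
    obtain ⟨i1, i2, i3⟩ := ih
    refine ⟨i1, i2, ?_⟩
    intro t ht0 hts hat
    rcases eq_or_lt_of_le hts with rfl | hlt
    · simp [hat] at hany
    · exact i3 t ht0 (by omega) hat
  | case3 s hpos =>
    exact ⟨le_refl 0, Or.inl rfl, fun t ht0 hts _ => by omega⟩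

lemma scanB_isMax (ver hor : List (List Int)) (n : Int) :
    IsMaxGood ver hor n (pvSearchB ver hor n (pvSmaxB ver hor n)) := by
  obtain ⟨s1, s2⟩ := smaxB_spec ver hor n
  obtain ⟨r1, r2, r3⟩ := searchB_spec ver hor n (pvSmaxB ver hor n)
  refine ⟨r1, ?_, ?_⟩
  · rcases r2 with h | ⟨hpos, hany⟩
    · exact Or.inl h
    · right
      obtain ⟨i, j, hi0, hin, hj0, hjn, hv, hh, hok⟩ := (anyCell_iff ver hor n _).mp hany
      exact ⟨by omega, i, j, hi0, hin, hj0, hjn, hv, hh, hok⟩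
  · intro s hg
    obtain ⟨hs1, i, j, hi0, hin, hj0, hjn, hv, hh, hok⟩ := hg
    have hsm : s ≤ pvSmaxB ver hor n := le_trans (le_min hv hh) (s2 i j hi0 hin hj0 hjn)
    exact r3 s (by omega) hsm ((anyCell_iff ver hor n s).mpr ⟨i, j, hi0, hin, hj0, hjn, hv, hh, hok⟩)

-- ---- assembly ----

lemma len_first (matrix : List (List String)) :
    PySem.List.len (PySem.List.pyGetD matrix 0 ([] : List String))
      = ((matrix.headD []).length : Int) := by
  cases matrix <;> simp [PySem.List.pyGetD_zero]

-- ===== VERDICT (by name: the statement is the Claim_ definition above) =====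
theorem largest_subsquare_spec : Claim_equal_largest_subsquare := by
  intro matrix _dom pre
  have hn : 0 < (matrix.headD []).length := pre.1
  unfold Spec_largest_subsquare largest_subsquare largest_subsquare_alt
  rw [len_first]
  obtain ⟨b1, b2⟩ := buildB_eq matrix (matrix.headD []).length
  rcases hEq : pvBuildB matrix (((matrix.headD []).length : Nat) : Int) with ⟨bh, bv, bp⟩
  rw [hEq] at b1 b2
  simp only at b1 b2
  simp only [initA_eq matrix hn, hEq, b1, b2]
  exact IsMaxGood_unique (scanA_isMax _ _ _) (scanB_isMax _ _ _)
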